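-- pv_equiv track=rewrite | github.com/AlexandreKempf/AoC2020 | 06-2.py | parse_form_intersection
-- ===== SOURCE A (Python) =====
-- import string
--
-- alphabet=string.ascii_lowercase[:26]
--
-- def parse_form_intersection(inputs):
--     form = [set(alphabet)]
--     identity_index = 0
--     for line in inputs:
--         if line == "":
--             identity_index += 1
--             form.append(set(alphabet))
--         else:
--             form[identity_index] &= set(line)
--     return form
-- ===== SOURCE B (Python) =====
-- import string
--
-- alphabet = string.ascii_lowercase[:26]
--
-- def parse_form_intersection(inputs):
--     # Phase 1: partition the lines into groups (blank line = group separator).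
--     done, cur = [], []
--     for line in inputs:
--         if line == "":
--             done.append(cur)
--             cur = []
--         else:
--             cur.append(line)
--     done.append(cur)
--     # Phase 2: intersect each group's letter sets, seeded with the full alphabet.
--     result = []
--     for g in done:
--         s = set(alphabet)
--         for l in g:
--             s &= set(l)
--         result.append(s)
--     return result
-- ===== Notes on version B (the rewrite author's own statement) =====
-- stated objective: alternative
-- what changed: A threads a list of sets and an index through one pass, intersecting in place; B first partitions the lines into groups with a (done, current) accumulator and then, in a separate pass, folds set intersection over each group seeded with the full alphabet.
import Mathlib
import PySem

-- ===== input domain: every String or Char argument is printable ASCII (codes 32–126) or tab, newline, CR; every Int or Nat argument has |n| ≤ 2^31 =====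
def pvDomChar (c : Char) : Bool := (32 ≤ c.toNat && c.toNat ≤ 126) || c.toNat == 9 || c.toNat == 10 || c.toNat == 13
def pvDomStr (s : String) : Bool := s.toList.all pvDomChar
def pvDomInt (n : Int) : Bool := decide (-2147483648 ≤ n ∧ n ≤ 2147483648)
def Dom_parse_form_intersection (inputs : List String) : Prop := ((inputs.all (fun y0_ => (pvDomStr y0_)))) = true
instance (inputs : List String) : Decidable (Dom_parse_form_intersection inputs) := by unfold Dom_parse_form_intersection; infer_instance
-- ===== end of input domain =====

-- B restructures A's single indexed pass into partition-into-groups followed by a per-group intersection fold (alternative decomposition; return value only).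

-- ===== PORT A =====
-- alphabet = string.ascii_lowercase[:26]
def pyAlphabet : String := "abcdefghijklmnopqrstuvwxyz"

-- set(s) for a string s: the set of its one-character strings
def setOfStr (s : String) : List String :=
  PySem.Set.ofList (s.toList.map (fun c => String.ofList [c]))

-- one iteration of A's loop over (form, identity_index)
def stepA (st : List (List String) × Int) (line : String) : List (List String) × Int :=
  if line = "" then (st.1 ++ [setOfStr pyAlphabet], st.2 + 1)
  else (PySem.List.pySetD st.1 st.2
          (PySem.Set.inter (PySem.List.pyGetD st.1 st.2 []) (setOfStr line)), st.2)

def parse_form_intersection (inputs : List String) : List (List String) :=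
  (inputs.foldl stepA ([setOfStr pyAlphabet], 0)).1

-- ===== PORT B =====
-- phase 1: one iteration of the partition loop over (done, cur)
def stepB (st : List (List String) × List String) (line : String) : List (List String) × List String :=
  if line = "" then (st.1 ++ [st.2], []) else (st.1, st.2 ++ [line])

-- phase 2: fold intersection over one group, seeded with set(alphabet)
def interAll (g : List String) : List String :=
  g.foldl (fun s l => PySem.Set.inter s (setOfStr l)) (setOfStr pyAlphabet)

def parse_form_intersection_alt (inputs : List String) : List (List String) :=
  let p := inputs.foldl stepB ([], [])
  (p.1 ++ [p.2]).map interAll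

-- ===== PRECONDITION & SPEC =====
def Spec_parse_form_intersection (inputs : List String) (out : List (List String)) : Prop := out = parse_form_intersection_alt inputs
instance (inputs : List String) (out : List (List String)) : Decidable (Spec_parse_form_intersection inputs out) := by unfold Spec_parse_form_intersection; infer_instance

-- ===== CLAIM (what is proved, stated in full; the proofs are below) =====
def Claim_equal_parse_form_intersection : Prop := ∀ (inputs : List String), Dom_parse_form_intersection inputs → Spec_parse_form_intersection inputs (parse_form_intersection inputs)

-- ===== LEMMAS AND PROOFS =====

-- common reference function: result of processing the remaining lines with current set s
def altFrom (s : List String) : List String → List (List String)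
  | [] => [s]
  | h :: t =>
    if h = "" then s :: altFrom (setOfStr pyAlphabet) t
    else altFrom (PySem.Set.inter s (setOfStr h)) t

lemma foldlA_eq (inputs : List String) : ∀ (gs : List (List String)) (s : List String),
    (inputs.foldl stepA (gs ++ [s], (gs.length : Int))).1 = gs ++ altFrom s inputs := by
  induction inputs with
  | nil => intro gs s; simp [altFrom]
  | cons h t ih =>
    intro gs s
    by_cases hh : h = ""
    · have hst : stepA (gs ++ [s], (gs.length : Int)) h
          = ((gs ++ [s]) ++ [setOfStr pyAlphabet], (((gs ++ [s]).length : Nat) : Int)) := by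
        simp [stepA, hh]
      rw [List.foldl_cons, hst, ih (gs ++ [s]) (setOfStr pyAlphabet)]
      simp [altFrom, hh]
    · have hst : stepA (gs ++ [s], (gs.length : Int)) h
          = (gs ++ [PySem.Set.inter s (setOfStr h)], (gs.length : Int)) := by
        simp [stepA, hh]
      rw [List.foldl_cons, hst, ih gs (PySem.Set.inter s (setOfStr h))]
      simp [altFrom, hh]

lemma interAll_concat (c : List String) (h : String) :
    interAll (c ++ [h]) = PySem.Set.inter (interAll c) (setOfStr h) := by
  simp [interAll]

lemma foldlB_eq (inputs : List String) : ∀ (ds : List (List String)) (c : List String),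
    ((inputs.foldl stepB (ds, c)).1 ++ [(inputs.foldl stepB (ds, c)).2]).map interAll
      = ds.map interAll ++ altFrom (interAll c) inputs := by
  induction inputs with
  | nil => intro ds c; simp [altFrom]
  | cons h t ih =>
    intro ds c
    by_cases hh : h = ""
    · have hst : stepB (ds, c) h = (ds ++ [c], []) := by simp [stepB, hh]
      rw [List.foldl_cons, hst, ih (ds ++ [c]) []]
      simp [altFrom, hh, interAll]
    · have hst : stepB (ds, c) h = (ds, c ++ [h]) := by simp [stepB, hh]
      rw [List.foldl_cons, hst, ih ds (c ++ [h]), interAll_concat]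
      simp [altFrom, hh]

-- ===== VERDICT (by name: the statement is the Claim_ definition above) =====
theorem parse_form_intersection_spec : Claim_equal_parse_form_intersection := by
  intro inputs _
  unfold Spec_parse_form_intersection parse_form_intersection parse_form_intersection_alt
  have hA := foldlA_eq inputs [] (setOfStr pyAlphabet)
  have hB := foldlB_eq inputs [] []
  simp only [List.nil_append, List.length_nil, Nat.cast_zero] at hA hB
  rw [hA, hB]
  simp [interAll]
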